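-- pv_equiv track=rewrite | github.com/PriyankTyagii/SkyInsight | main.py | _parse_ai_insights
-- ===== SOURCE A (Python) =====
-- def _parse_ai_insights(text):
--     """Parse AI-generated insights into structured format"""
--     # Simple parsing - in production, use more sophisticated NLP
--     lines = text.split('\n')
--     insights = []
--
--     current_insight = {'title': '', 'content': ''}
--     for line in lines:
--         line = line.strip()
--         if line and ':' in line and len(line) < 50:
--             if current_insight['title']:
--                 insights.append(current_insight)
--             current_insight = {'title': line.replace(':', ''), 'content': ''}
--         elif line and current_insight['title']:
--             current_insight['content'] += line + ' '
--
--     if current_insight['title']: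
--         insights.append(current_insight)
--
--     return insights[:4]  # Return top 4 insights
-- ===== SOURCE B (Python) =====
-- def _parse_ai_insights(text):
--     """Parse AI-generated insights into structured format"""
--     # Staged: strip all lines, locate the header lines by index, then build each
--     # insight by slicing the content block between consecutive header indices.
--     lines = [l.strip() for l in text.split('\n')]
--     idxs = [i for i, l in enumerate(lines) if l and ':' in l and len(l) < 50]
--     bounds = idxs[1:] + [len(lines)]
--     sections = [(lines[i].replace(':', ''),
--                  ''.join(c + ' ' for c in lines[i + 1:e] if c))
--                 for i, e in zip(idxs, bounds)]
--     # a header made only of colons delimits sections but yields no titled insight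
--     titled = [{'title': t, 'content': c} for t, c in sections if t]
--     return titled[:4]
-- ===== Notes on version B (the rewrite author's own statement) =====
-- stated objective: alternative
-- what changed: Replaces A's single stateful scan with a running current_insight dict by a staged index-based construction: strip all lines, compute the list of header-line indices, then build each insight by slicing the content block between consecutive header indices and joining its non-empty lines.
import Mathlib
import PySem

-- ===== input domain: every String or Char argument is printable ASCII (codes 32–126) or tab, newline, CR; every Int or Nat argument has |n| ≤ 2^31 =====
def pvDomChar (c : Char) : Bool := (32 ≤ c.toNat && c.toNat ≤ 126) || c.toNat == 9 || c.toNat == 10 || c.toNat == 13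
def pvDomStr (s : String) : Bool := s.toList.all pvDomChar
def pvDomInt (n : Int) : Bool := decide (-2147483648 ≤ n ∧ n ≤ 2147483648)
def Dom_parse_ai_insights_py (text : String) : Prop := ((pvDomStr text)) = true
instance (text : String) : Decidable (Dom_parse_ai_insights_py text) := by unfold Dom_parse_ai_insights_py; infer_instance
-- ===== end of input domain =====

-- B replaces A's stateful single scan (running current_insight dict) with a staged,
-- index-based construction: strip all lines, locate header-line indices, slice the
-- content block between consecutive header indices (objective: alternative; same values).

-- ===== PORT A =====
-- loop body of A's for-loop: state = (insights, current title, current content)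
def pvStepA (st : List (List (String × String)) × String × String) (line0 : String) :
    List (List (String × String)) × String × String :=
  let line := PySem.Str.strip line0
  if line ≠ "" ∧ PySem.Str.isIn ":" line = true ∧ PySem.Str.len line < 50 then
    (if st.2.1 ≠ "" then st.1 ++ [[("title", st.2.1), ("content", st.2.2)]] else st.1,
     PySem.Str.replace line ":" "", "")
  else if line ≠ "" ∧ st.2.1 ≠ "" then
    (st.1, st.2.1, st.2.2 ++ (line ++ " "))
  else st

def parse_ai_insights_py (text : String) : List (List (String × String)) :=
  let lines := (PySem.Str.split? text "\n").getD []
  let s := lines.foldl pvStepA ([], "", "")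
  PySem.List.slice
    (if s.2.1 ≠ "" then s.1 ++ [[("title", s.2.1), ("content", s.2.2)]] else s.1)
    none (some 4)

-- ===== PORT B =====
-- the comprehension guard 'l and ':' in l and len(l) < 50'
def pvIsTitle (l : String) : Bool :=
  l != "" && PySem.Str.isIn ":" l && decide (PySem.Str.len l < 50)

-- ''.join(c + ' ' for c in cs)
def pvJoinSp (cs : List String) : String := cs.foldl (fun acc c => acc ++ (c ++ " ")) ""

def parse_ai_insights_py_alt (text : String) : List (List (String × String)) :=
  let lines := ((PySem.Str.split? text "\n").getD []).map PySem.Str.strip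
  let idxs := ((PySem.List.enumerate lines).filter (fun p => pvIsTitle p.2)).map (fun p => p.1)
  let bounds := PySem.List.slice idxs (some 1) none ++ [PySem.List.len lines]
  -- lines[i] is always in range (i comes from enumerate), so pyGetD is exact here
  let sections := (idxs.zip bounds).map (fun p =>
    (PySem.Str.replace (PySem.List.pyGetD lines p.1 "") ":" "",
     pvJoinSp ((PySem.List.slice lines (some (p.1 + 1)) (some p.2)).filter (fun c => c != ""))))
  let titled := (sections.filter (fun s => s.1 != "")).map
    (fun s => [("title", s.1), ("content", s.2)])
  PySem.List.slice titled none (some 4)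

-- ===== PRECONDITION & SPEC =====
def Spec_parse_ai_insights_py (text : String) (out : List (List (String × String))) : Prop := out = parse_ai_insights_py_alt text
instance (text : String) (out : List (List (String × String))) : Decidable (Spec_parse_ai_insights_py text out) := by unfold Spec_parse_ai_insights_py; infer_instance

-- ===== CLAIM (what is proved, stated in full; the proofs are below) =====
def Claim_equal_parse_ai_insights_py : Prop := ∀ (text : String), Dom_parse_ai_insights_py text → Spec_parse_ai_insights_py text (parse_ai_insights_py text)

-- ===== LEMMAS AND PROOFS =====

-- dict literal {'title': t, 'content': c}
def pvMkD (p : String × String) : List (String × String) := [("title", p.1), ("content", p.2)]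

-- A's recursion, extracted: remaining stripped lines, current title, current content
def pvGo : List String → String → String → List (String × String)
  | [], t, c => if t ≠ "" then [(t, c)] else []
  | s :: ss, t, c =>
    if pvIsTitle s then
      (if t ≠ "" then [(t, c)] else []) ++ pvGo ss (PySem.Str.replace s ":" "") ""
    else if s != "" && t != "" then pvGo ss t (c ++ (s ++ " "))
    else pvGo ss t c

-- grouping of stripped lines into (raw title, nonempty content lines) sections
def pvGB : List String → List (String × List String)
  | [] => []
  | s :: rest =>
    if pvIsTitle s then
      (s, (rest.takeWhile (fun x => !pvIsTitle x)).filter (fun x => x != "")) ::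
        pvGB (rest.dropWhile (fun x => !pvIsTitle x))
    else pvGB rest
termination_by l => l.length
decreasing_by
  · simp only [List.length_cons]
    have := List.length_dropWhile_le (fun x => !pvIsTitle x) rest
    omega
  · simp

def pvBuild (p : String × List String) : String × String :=
  (PySem.Str.replace p.1 ":" "", pvJoinSp p.2)

-- Nat positions of the title lines
def pvIdxs : List String → List Nat
  | [] => []
  | x :: L => if pvIsTitle x then 0 :: (pvIdxs L).map (· + 1) else (pvIdxs L).map (· + 1)

def pvEntry (M : List String) (p : Nat × Nat) : String × String :=
  (PySem.Str.replace (M.getD p.1 "") ":" "",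
   pvJoinSp (((M.drop (p.1 + 1)).take (p.2 - (p.1 + 1))).filter (fun x => x != "")))

def pvSecs (L : List String) : List (String × String) :=
  ((pvIdxs L).zip ((pvIdxs L).drop 1 ++ [L.length])).map (pvEntry L)

lemma pvIsTitle_iff (l : String) :
    pvIsTitle l = true ↔ (l ≠ "" ∧ PySem.Str.isIn ":" l = true ∧ PySem.Str.len l < 50) := by
  simp [pvIsTitle, and_assoc]

lemma pvJoinSp_foldl (l : List String) (a : String) :
    l.foldl (fun acc c => acc ++ (c ++ " ")) a = a ++ pvJoinSp l := by
  induction l generalizing a with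
  | nil => simp [pvJoinSp]
  | cons x xs ih =>
    simp only [pvJoinSp, List.foldl_cons] at *
    rw [ih, ih (("" : String) ++ (x ++ " "))]
    simp [String.append_assoc]

lemma pvJoinSp_cons (x : String) (l : List String) :
    pvJoinSp (x :: l) = (x ++ " ") ++ pvJoinSp l := by
  simp only [pvJoinSp, List.foldl_cons]
  rw [pvJoinSp_foldl]
  rfl

lemma pvGB_skip (L : List String) :
    pvGB (L.dropWhile (fun x => !pvIsTitle x)) = pvGB L := by
  induction L with
  | nil => simp
  | cons x L ih =>
    by_cases h : pvIsTitle x = true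
    · simp [List.dropWhile_cons, h]
    · rw [List.dropWhile_cons]
      simp only [h, Bool.not_false, if_true]
      rw [ih]
      rw [pvGB]
      simp [h]

lemma pvIdxs_nil_take (L : List String) (h : pvIdxs L = []) :
    L.takeWhile (fun x => !pvIsTitle x) = L := by
  induction L with
  | nil => simp
  | cons x L ih =>
    rw [pvIdxs] at h
    by_cases hx : pvIsTitle x = true
    · simp [hx] at h
    · simp only [hx, if_false] at h
      simp at h
      simp [List.takeWhile_cons, hx, ih h]

lemma pvIdxs_nil_gb (L : List String) (h : pvIdxs L = []) : pvGB L = [] := by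
  induction L with
  | nil => simp [pvGB]
  | cons x L ih =>
    rw [pvIdxs] at h
    by_cases hx : pvIsTitle x = true
    · simp [hx] at h
    · simp only [hx, if_false] at h
      simp at h
      rw [pvGB]; simp [hx, ih h]

lemma pvIdxs_head_take (L : List String) (j : Nat) (I : List Nat) (h : pvIdxs L = j :: I) :
    L.take j = L.takeWhile (fun x => !pvIsTitle x) := by
  induction L generalizing j I with
  | nil => simp [pvIdxs] at h
  | cons x L ih =>
    rw [pvIdxs] at h
    by_cases hx : pvIsTitle x = true
    · simp only [hx, if_true, List.cons.injEq] at h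
      obtain ⟨rfl, _⟩ := h
      simp [List.takeWhile_cons, hx]
    · simp only [hx, if_false] at h
      cases hL : pvIdxs L with
      | nil => rw [hL] at h; simp at h
      | cons j' I' =>
        rw [hL] at h
        simp only [List.map_cons, List.cons.injEq] at h
        obtain ⟨rfl, _⟩ := h
        simp [List.takeWhile_cons, hx, List.take_succ_cons, ih j' I' hL]

-- characterization of A's recursion by the grouped sections
lemma pvGo_char (n : Nat) : ∀ (ss : List String), ss.length ≤ n →
    (∀ c, pvGo ss "" c = ((pvGB ss).map pvBuild).filter (fun p => p.1 != "")) ∧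
    (∀ t c, t ≠ "" → pvGo ss t c =
      (t, c ++ pvJoinSp ((ss.takeWhile (fun x => !pvIsTitle x)).filter (fun x => x != ""))) ::
        ((pvGB (ss.dropWhile (fun x => !pvIsTitle x))).map pvBuild).filter (fun p => p.1 != "")) := by
  induction n with
  | zero =>
    intro ss hss
    have : ss = [] := by cases ss <;> simp_all
    subst this
    constructor
    · intro c; simp [pvGo, pvGB]
    · intro t c ht; simp [pvGo, pvGB, ht, pvJoinSp]
  | succ n ih =>
    intro ss hss
    cases ss with
    | nil =>
      constructor
      · intro c; simp [pvGo, pvGB]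
      · intro t c ht; simp [pvGo, pvGB, ht, pvJoinSp]
    | cons s rest =>
      simp only [List.length_cons, Nat.succ_le_succ_iff] at hss
      have hrest := ih rest hss
      have hdrop := ih (rest.dropWhile (fun x => !pvIsTitle x))
        (le_trans (List.length_dropWhile_le _ _) hss)
      constructor
      · intro c
        rw [pvGo]
        by_cases h1 : pvIsTitle s = true
        · simp only [h1, if_true]
          rw [if_neg (fun h => h rfl), List.nil_append]
          rw [pvGB]
          simp only [h1, if_true, List.map_cons, List.filter_cons, pvBuild]
          by_cases h2 : PySem.Str.replace s ":" "" = ""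
          · rw [h2, hrest.1 ""]
            simp only [bne_self_eq_false, Bool.false_eq_true, if_false]
            rw [← pvGB_skip rest]
          · rw [hrest.2 _ "" h2]
            have hb : (PySem.Str.replace s ":" "" != "") = true := by simp [bne_iff_ne, h2]
            simp only [hb, if_true]
            simp [pvBuild]
        · simp only [h1, Bool.false_eq_true, if_false]
          have : (s != "" && ("" : String) != "") = false := by simp
          rw [this]
          simp only [Bool.false_eq_true, if_false]
          rw [pvGB]
          simp only [h1, Bool.false_eq_true, if_false]
          exact hrest.1 c
      · intro t c ht
        rw [pvGo]
        by_cases h1 : pvIsTitle s = true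
        · simp only [h1, if_true, if_pos ht]
          rw [List.takeWhile_cons, List.dropWhile_cons]
          simp only [h1, Bool.not_true, Bool.false_eq_true, if_false]
          rw [pvGB]
          simp only [h1, if_true, List.map_cons, List.filter_cons, pvBuild]
          by_cases h2 : PySem.Str.replace s ":" "" = ""
          · rw [h2, hrest.1 ""]
            simp only [bne_self_eq_false, Bool.false_eq_true, if_false]
            rw [← pvGB_skip rest]
            simp [pvJoinSp]
          · rw [hrest.2 _ "" h2]
            have hb : (PySem.Str.replace s ":" "" != "") = true := by simp [bne_iff_ne, h2]
            simp only [hb, if_true]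
            simp [pvBuild, pvJoinSp]
        · simp only [h1, Bool.false_eq_true, if_false]
          rw [List.takeWhile_cons, List.dropWhile_cons]
          simp only [h1, Bool.not_false, if_true]
          by_cases h2 : s = ""
          · subst h2
            have : (("" : String) != "" && t != "") = false := by simp
            rw [this]
            simp only [Bool.false_eq_true, if_false, List.filter_cons]
            simp only [bne_self_eq_false, Bool.false_eq_true, if_false]
            exact hrest.2 t c ht
          · have : (s != "" && t != "") = true := by simp [bne_iff_ne, h2, ht]
            rw [this]
            simp only [if_true, List.filter_cons]
            have hs : (s != "") = true := by simp [bne_iff_ne, h2]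
            rw [hs]
            simp only [if_true]
            rw [hrest.2 t _ ht, pvJoinSp_cons]
            simp [String.append_assoc]

-- the final 'if current_insight['title']: insights.append(...)' step
def pvFlush (s : List (List (String × String)) × String × String) : List (List (String × String)) :=
  if s.2.1 ≠ "" then s.1 ++ [[("title", s.2.1), ("content", s.2.2)]] else s.1

-- A's fold equals A's recursion
lemma pvLoopA : ∀ (ls : List String) ins t c,
    pvFlush (ls.foldl pvStepA (ins, t, c))
    = ins ++ (pvGo (ls.map PySem.Str.strip) t c).map pvMkD := by
  intro ls
  induction ls with
  | nil =>
    intro ins t c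
    simp only [List.foldl_nil, List.map_nil, pvGo, pvFlush]
    by_cases ht : t = ""
    · simp [ht, pvMkD]
    · simp [ht, pvMkD]
  | cons l ls ih =>
    intro ins t c
    simp only [List.foldl_cons, List.map_cons]
    by_cases h1 : pvIsTitle (PySem.Str.strip l) = true
    · have h1' := (pvIsTitle_iff _).mp h1
      rw [show pvStepA (ins, t, c) l =
          ((if t ≠ "" then ins ++ [[("title", t), ("content", c)]] else ins),
           PySem.Str.replace (PySem.Str.strip l) ":" "", "") from by
            unfold pvStepA; rw [if_pos h1']]
      rw [ih, pvGo]
      simp only [h1, if_true, List.map_append]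
      by_cases ht : t = ""
      · simp [ht, pvMkD]
      · simp [ht, pvMkD]
    · have h1' : ¬ (PySem.Str.strip l ≠ "" ∧ PySem.Str.isIn ":" (PySem.Str.strip l) = true ∧
          PySem.Str.len (PySem.Str.strip l) < 50) := fun h => h1 ((pvIsTitle_iff _).mpr h)
      rw [pvGo]
      simp only [h1, Bool.false_eq_true, if_false]
      by_cases h2 : PySem.Str.strip l = ""
      · rw [show pvStepA (ins, t, c) l = (ins, t, c) from by
              unfold pvStepA; rw [if_neg h1', if_neg (by simp [h2])]]
        have : (PySem.Str.strip l != "" && t != "") = false := by simp [h2]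
        rw [this]
        simp only [Bool.false_eq_true, if_false]
        exact ih ins t c
      · by_cases ht : t = ""
        · rw [show pvStepA (ins, t, c) l = (ins, t, c) from by
                unfold pvStepA; rw [if_neg h1', if_neg (by simp [ht])]]
          have : (PySem.Str.strip l != "" && t != "") = false := by simp [ht]
          rw [this]
          simp only [Bool.false_eq_true, if_false]
          exact ih ins t c
        · rw [show pvStepA (ins, t, c) l = (ins, t, c ++ (PySem.Str.strip l ++ " ")) from by
                unfold pvStepA; rw [if_neg h1', if_pos ⟨h2, ht⟩]]
          have : (PySem.Str.strip l != "" && t != "") = true := by simp [bne_iff_ne, h2, ht]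
          rw [this]
          simp only [if_true]
          exact ih ins t (c ++ (PySem.Str.strip l ++ " "))

-- index shift of the per-section entry
lemma pvEntry_shift (x : String) (L : List String) (ps : List (Nat × Nat)) :
    (ps.map (fun q => (q.1 + 1, q.2 + 1))).map (pvEntry (x :: L)) = ps.map (pvEntry L) := by
  rw [List.map_map]
  apply List.map_congr_left
  intro q _
  simp only [Function.comp_apply, pvEntry, List.getD_cons_succ, List.drop_succ_cons]
  have : q.2 + 1 - (q.1 + 1 + 1) = q.2 - (q.1 + 1) := by omega
  rw [this]

-- the staged index/slice construction equals the grouped sections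
lemma pvSecs_eq (n : Nat) : ∀ (L : List String), L.length ≤ n →
    pvSecs L = (pvGB L).map pvBuild := by
  induction n with
  | zero =>
    intro L hL
    have : L = [] := by cases L <;> simp_all
    subst this
    simp [pvSecs, pvIdxs, pvGB]
  | succ n ih =>
    intro L hL
    cases L with
    | nil => simp [pvSecs, pvIdxs, pvGB]
    | cons x L =>
      simp only [List.length_cons, Nat.succ_le_succ_iff] at hL
      by_cases hx : pvIsTitle x = true
      · rw [pvGB]
        simp only [hx, if_true, List.map_cons]
        cases hI : pvIdxs L with
        | nil =>
          have htake := pvIdxs_nil_take L hI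
          have hgb : pvGB (L.dropWhile (fun x => !pvIsTitle x)) = [] := by
            rw [pvGB_skip]; exact pvIdxs_nil_gb L hI
          rw [hgb]
          simp only [List.map_nil]
          rw [pvSecs, pvIdxs]
          simp only [hx, if_true, hI, List.map_nil]
          simp only [List.drop_succ_cons, List.drop_nil, List.nil_append, List.length_cons,
            List.zip_cons_cons, List.zip_nil_right, List.map_cons, List.map_nil]
          rw [pvEntry]
          simp only [List.getD_cons_zero, List.drop_succ_cons, List.drop_zero]
          have : L.length + 1 - (0 + 1) = L.length := by omega
          rw [this, List.take_length]
          simp [pvBuild, htake]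
        | cons j I' =>
          have htake := pvIdxs_head_take L j I' hI
          rw [pvSecs, pvIdxs]
          simp only [hx, if_true, hI, List.map_cons]
          simp only [List.drop_succ_cons, List.drop_zero, List.length_cons]
          rw [show (j + 1) :: List.map (· + 1) I' ++ [L.length + 1]
              = ((j+1) :: (List.map (· + 1) I' ++ [L.length + 1])) from rfl]
          rw [List.zip_cons_cons, List.map_cons]
          congr 1
          · rw [pvEntry]
            simp only [List.getD_cons_zero, List.drop_succ_cons, List.drop_zero]
            have : j + 1 - (0 + 1) = j := by omega
            rw [this, pvBuild, htake]
          · have hmap : List.map (· + 1) I' ++ [L.length + 1]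
                = List.map (fun k => k + 1) (I' ++ [L.length]) := by simp
            rw [hmap]
            rw [show ((j + 1) :: List.map (· + 1) I') = List.map (fun k => k + 1) (j :: I') from rfl]
            rw [List.zip_map]
            have : List.map (Prod.map (fun k => k + 1) (fun k => k + 1)) ((j :: I').zip (I' ++ [L.length]))
                = List.map (fun q => (q.1 + 1, q.2 + 1)) ((j :: I').zip (I' ++ [L.length])) := by
              apply List.map_congr_left; intro q _; rfl
            rw [this, pvEntry_shift]
            have := ih L hL
            rw [pvSecs, hI] at this
            simp only [List.drop_succ_cons, List.drop_zero] at this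
            rw [this, pvGB_skip]
      · rw [pvGB]
        simp only [hx, if_false, Bool.false_eq_true]
        rw [pvSecs, pvIdxs]
        simp only [hx, if_false, Bool.false_eq_true, List.length_cons]
        have hmap : ∀ (I : List Nat) (m : Nat), (List.map (· + 1) I).drop 1 ++ [m + 1]
            = List.map (fun k => k + 1) (I.drop 1 ++ [m]) := by
          intro I m; simp
        rw [hmap]
        rw [show List.map (· + 1) (pvIdxs L) = List.map (fun k => k + 1) (pvIdxs L) from rfl]
        rw [List.zip_map]
        have : List.map (Prod.map (fun k => k + 1) (fun k => k + 1)) ((pvIdxs L).zip ((pvIdxs L).drop 1 ++ [L.length]))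
            = List.map (fun q => (q.1 + 1, q.2 + 1)) ((pvIdxs L).zip ((pvIdxs L).drop 1 ++ [L.length])) := by
          apply List.map_congr_left; intro q _; rfl
        rw [this, pvEntry_shift]
        have := ih L hL
        rw [pvSecs] at this
        exact this

-- the port's enumerate/filter/map index computation equals pvIdxs (with casts)
lemma pvIdxs_port (L : List String) : ∀ (s : Nat),
    ((PySem.List.enumerate L (s : Int)).filter (fun p => pvIsTitle p.2)).map (fun p => p.1)
    = (pvIdxs L).map (fun k => ((k + s : Nat) : Int)) := by
  induction L with
  | nil => intro s; simp [PySem.List.enumerate_nil, pvIdxs]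
  | cons x L ih =>
    intro s
    rw [PySem.List.enumerate_cons, pvIdxs]
    have hcast : (s : Int) + 1 = ((s + 1 : Nat) : Int) := by push_cast; ring
    by_cases hx : pvIsTitle x = true
    · simp only [hx, if_true, List.filter_cons, List.map_cons]
      rw [hcast, ih (s + 1), List.map_map]
      congr 1
      · simp
      · apply List.map_congr_left
        intro k _
        simp only [Function.comp_apply]
        push_cast; ring
    · simp only [hx, if_false, List.filter_cons, Bool.false_eq_true]
      rw [hcast, ih (s + 1), List.map_map]
      apply List.map_congr_left
      intro k _
      simp only [Function.comp_apply]
      push_cast; ring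

-- ===== VERDICT (by name: the statement is the Claim_ definition above) =====
theorem parse_ai_insights_py_spec : Claim_equal_parse_ai_insights_py := by
  intro text _
  show parse_ai_insights_py text = parse_ai_insights_py_alt text
  have hA : parse_ai_insights_py text
      = PySem.List.slice
          (pvFlush (((PySem.Str.split? text "\n").getD []).foldl pvStepA ([], "", "")))
          none (some 4) := rfl
  rw [hA, pvLoopA, List.nil_append]
  set L : List String := ((PySem.Str.split? text "\n").getD []).map PySem.Str.strip with hL
  rw [(pvGo_char L.length L le_rfl).1 ""]
  have hidx : ((PySem.List.enumerate L).filter (fun p => pvIsTitle p.2)).map (fun p => p.1)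
      = (pvIdxs L).map (fun k : Nat => (k : Int)) := by
    have h := pvIdxs_port L 0
    simp only [Nat.cast_zero, Nat.add_zero] at h
    exact h
  have hB : parse_ai_insights_py_alt text
      = PySem.List.slice
          (List.map (fun s => [("title", s.1), ("content", s.2)])
            (List.filter (fun s => s.1 != "")
              (List.map
                (fun p : Int × Int =>
                  (PySem.Str.replace (PySem.List.pyGetD L p.1 "") ":" "",
                   pvJoinSp (List.filter (fun c => c != "") (PySem.List.slice L (some (p.1 + 1)) (some p.2)))))
                (List.zip
                  (List.map (fun p : Int × String => p.1)
                    (List.filter (fun p => pvIsTitle p.2) (PySem.List.enumerate L)))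
                  (PySem.List.slice
                      (List.map (fun p : Int × String => p.1)
                        (List.filter (fun p => pvIsTitle p.2) (PySem.List.enumerate L)))
                      (some 1) none
                    ++ [PySem.List.len L])))))
          none (some 4) := rfl
  rw [hB, hidx]
  rw [PySem.List.slice_from _ (by norm_num : (0 : Int) ≤ 1)]
  rw [show ((1 : Int).toNat) = 1 from rfl]
  rw [show ((pvIdxs L).map (fun k : Nat => (k : Int))).drop 1
      = ((pvIdxs L).drop 1).map (fun k : Nat => (k : Int)) from by simp]
  rw [show PySem.List.len L = ((L.length : Nat) : Int) from by simp [PySem.List.len_eq]]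
  rw [show ((pvIdxs L).drop 1).map (fun k : Nat => (k : Int)) ++ [((L.length : Nat) : Int)]
      = ((pvIdxs L).drop 1 ++ [L.length]).map (fun k : Nat => (k : Int)) from by simp]
  rw [List.zip_map, List.map_map]
  have hsec : List.map
      ((fun p : Int × Int =>
        (PySem.Str.replace (PySem.List.pyGetD L p.1 "") ":" "",
         pvJoinSp ((PySem.List.slice L (some (p.1 + 1)) (some p.2)).filter (fun c => c != "")))) ∘
        Prod.map (fun k : Nat => (k : Int)) (fun k : Nat => (k : Int)))
      ((pvIdxs L).zip ((pvIdxs L).drop 1 ++ [L.length]))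
      = pvSecs L := by
    rw [pvSecs]
    apply List.map_congr_left
    intro q _
    simp only [Function.comp_apply, Prod.map]
    rw [show ((q.1 : Int) + 1) = ((q.1 + 1 : Nat) : Int) from by push_cast; ring]
    rw [PySem.List.slice_natCast, PySem.List.pyGetD_natCast]
    rfl
  rw [hsec, pvSecs_eq L.length L le_rfl]
  rfl
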